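-- pv_equiv track=rewrite | github.com/NCBM/pyculator | pyculator/parser.py | _trail
-- ===== SOURCE A (Python) =====
-- import string
--
-- EXPR_NUMBER = 1
--
-- EXPR_OPERATOR = 2
--
-- EXPR_EQU = 4
--
-- EXPR_ENTER = 8
--
-- EXPR_EXIT = 16
--
-- EXPR_SEP = 32
--
-- EXPR_FUNC = 64
--
-- EXPR_UNKNOWN = 1024
--
-- number = string.digits + "._@%"
--
-- operator = "+-*/^!"
--
-- equ = "=<>"
--
-- enter = "([{"
--
-- eexit = ")]}"
--
-- def exprtype(c: str):
--     if c in number: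
--         return EXPR_NUMBER
--     elif c in operator:
--         return EXPR_OPERATOR
--     elif c in equ:
--         return EXPR_EQU
--     elif c in enter:
--         return EXPR_ENTER
--     elif c in eexit:
--         return EXPR_EXIT
--     elif c == ",":
--         return EXPR_SEP
--     elif c in string.ascii_letters:
--         return EXPR_FUNC
--     else:
--         return EXPR_UNKNOWN
--
-- def _trail(expr: str, sym: str = ""):
--     buf, buftype = "", EXPR_NUMBER
--     for c in expr:
--         if c == string.whitespace:
--             continue
--         if not buf:
--             buf += c
--             buftype = exprtype(c)
--         else:
--             if (_etype := exprtype(c)) == buftype: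
--                 buf += c
--             else:
--                 yield buf, buftype
--                 buf, buftype = c, _etype
--     if buf:
--         yield buf, buftype
-- ===== SOURCE B (Python) =====
-- import string
--
-- EXPR_NUMBER = 1
-- EXPR_OPERATOR = 2
-- EXPR_EQU = 4
-- EXPR_ENTER = 8
-- EXPR_EXIT = 16
-- EXPR_SEP = 32
-- EXPR_FUNC = 64
-- EXPR_UNKNOWN = 1024
--
-- number = string.digits + "._@%"
-- operator = "+-*/^!"
-- equ = "=<>"
-- enter = "([{"
-- eexit = ")]}"
--
-- def exprtype(c: str):
--     if c in number:
--         return EXPR_NUMBER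
--     elif c in operator:
--         return EXPR_OPERATOR
--     elif c in equ:
--         return EXPR_EQU
--     elif c in enter:
--         return EXPR_ENTER
--     elif c in eexit:
--         return EXPR_EXIT
--     elif c == ",":
--         return EXPR_SEP
--     elif c in string.ascii_letters:
--         return EXPR_FUNC
--     else:
--         return EXPR_UNKNOWN
--
-- def _trail(expr: str, sym: str = ""):
--     # span-based: slice out each maximal run of same-type characters
--     i, n = 0, len(expr)
--     while i < n:
--         k = exprtype(expr[i])
--         j = i + 1
--         while j < n and exprtype(expr[j]) == k:
--             j += 1
--         yield expr[i:j], k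
--         i = j
-- ===== Notes on version B (the rewrite author's own statement) =====
-- stated objective: simpler
-- what changed: Replaced A's stateful buf/buftype accumulator loop (building the current token character by character and flushing it on a type change and after the loop) with an index/span scan that slices out each maximal run of same-type characters at once and yields it; the dead whitespace-comparison guard, which never fires, disappears.
import Mathlib
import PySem

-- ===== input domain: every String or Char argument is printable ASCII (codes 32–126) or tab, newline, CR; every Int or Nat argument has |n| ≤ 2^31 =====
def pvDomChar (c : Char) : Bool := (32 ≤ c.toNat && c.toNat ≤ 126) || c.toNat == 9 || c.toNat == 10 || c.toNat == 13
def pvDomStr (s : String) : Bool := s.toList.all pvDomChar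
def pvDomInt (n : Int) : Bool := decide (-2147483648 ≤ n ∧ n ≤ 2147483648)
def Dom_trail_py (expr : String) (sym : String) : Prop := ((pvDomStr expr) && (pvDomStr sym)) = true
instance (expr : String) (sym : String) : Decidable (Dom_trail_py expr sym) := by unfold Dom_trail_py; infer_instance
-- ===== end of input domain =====

-- B replaces A's buf/buftype accumulator loop with index-free maximal-run slicing
-- (takeWhile/dropWhile spans); objective: simpler. Return value only (generators listed).

-- ===== PORT A =====
-- A's character classifier exprtype, transliterated (membership in the literal strings).
def exprtypeC (c : Char) : Int :=
  if c ∈ "0123456789._@%".toList then 1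
  else if c ∈ "+-*/^!".toList then 2
  else if c ∈ "=<>".toList then 4
  else if c ∈ "([{".toList then 8
  else if c ∈ ")]}".toList then 16
  else if c = ',' then 32
  else if c ∈ "abcdefghijklmnopqrstuvwxyzABCDEFGHIJKLMNOPQRSTUVWXYZ".toList then 64
  else 1024

-- one loop step of A: state = (yielded list, buf as List Char, buftype).
-- A compares the 1-char string of c with the whole 6-char whitespace string (never true); ported literally.
def trailStepA (s : List (String × Int) × List Char × Int) (c : Char) :
    List (String × Int) × List Char × Int :=
  if String.ofList [c] = " \t\n\r\x0b\x0c" then s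
  else
    match s with
    | (acc, buf, bt) =>
      if buf = [] then (acc, [c], exprtypeC c)
      else if exprtypeC c = bt then (acc, buf ++ [c], bt)
      else (acc ++ [(String.ofList buf, bt)], [c], exprtypeC c)

def trail_py (expr : String) (sym : String) : List (String × Int) :=
  match expr.toList.foldl trailStepA ([], [], (1 : Int)) with
  | (acc, buf, bt) => if buf = [] then acc else acc ++ [(String.ofList buf, bt)]

-- ===== PORT B =====
-- B slices out each maximal run of characters with the same exprtype.
def trailRunsB : List Char → List (String × Int)
  | [] => []
  | c :: rest =>
    let k := exprtypeC c
    (String.ofList (c :: rest.takeWhile (fun d => exprtypeC d == k)), k) ::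
      trailRunsB (rest.dropWhile (fun d => exprtypeC d == k))
termination_by l => l.length
decreasing_by
  simp only [List.length_cons]
  exact Nat.lt_succ_of_le (List.length_dropWhile_le _ _)

def trail_py_alt (expr : String) (sym : String) : List (String × Int) :=
  trailRunsB expr.toList

-- ===== PRECONDITION & SPEC =====
def Spec_trail_py (expr : String) (sym : String) (out : List (String × Int)) : Prop := out = trail_py_alt expr sym
instance (expr : String) (sym : String) (out : List (String × Int)) : Decidable (Spec_trail_py expr sym out) := by unfold Spec_trail_py; infer_instance

-- ===== CLAIM (what is proved, stated in full; the proofs are below) =====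
def Claim_equal_trail_py : Prop := ∀ (expr : String) (sym : String), Dom_trail_py expr sym → Spec_trail_py expr sym (trail_py expr sym)

-- ===== LEMMAS AND PROOFS =====

-- recursive characterisation of A's loop-plus-final-yield
def trailF : List Char → Int → List Char → List (String × Int)
  | buf, bt, [] => if buf = [] then [] else [(String.ofList buf, bt)]
  | buf, bt, c :: l =>
    if buf = [] then trailF [c] (exprtypeC c) l
    else if exprtypeC c = bt then trailF (buf ++ [c]) bt l
    else (String.ofList buf, bt) :: trailF [c] (exprtypeC c) l

theorem ws_guard_false (c : Char) : (String.ofList [c] = " \t\n\r\x0b\x0c") = False := by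
  simp only [eq_iff_iff, iff_false]
  intro h
  have h2 := congrArg List.length (congrArg String.toList h)
  simp at h2

theorem foldA_char (l : List Char) (acc : List (String × Int)) (buf : List Char) (bt : Int) :
    (match l.foldl trailStepA (acc, buf, bt) with
     | (a, b, t) => if b = [] then a else a ++ [(String.ofList b, t)]) =
    acc ++ trailF buf bt l := by
  induction l generalizing acc buf bt with
  | nil =>
    simp only [List.foldl_nil, trailF]
    split <;> simp
  | cons c l ih =>
    simp only [List.foldl_cons, trailStepA, ws_guard_false, if_false, trailF]
    by_cases hb : buf = []
    · simp [hb, ih]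
    · by_cases ht : exprtypeC c = bt
      · simp [hb, ht, ih]
      · simp [hb, ht, ih]

theorem trailF_run (l : List Char) (buf : List Char) (bt : Int) (hb : buf ≠ []) :
    trailF buf bt l =
      (String.ofList (buf ++ l.takeWhile (fun d => exprtypeC d == bt)), bt) ::
        trailRunsB (l.dropWhile (fun d => exprtypeC d == bt)) := by
  induction l generalizing buf bt with
  | nil => simp [trailF, hb, trailRunsB]
  | cons c l ih =>
    by_cases ht : exprtypeC c = bt
    · simp only [trailF, hb, if_false, ht, List.takeWhile_cons, List.dropWhile_cons,
        beq_self_eq_true, if_pos]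
      rw [ih (buf ++ [c]) bt (by simp)]
      simp
    · have hbe : (exprtypeC c == bt) = false := by simp [ht]
      simp only [trailF, hb, if_false, ht, List.takeWhile_cons, List.dropWhile_cons, hbe]
      rw [ih [c] (exprtypeC c) (by simp)]
      simp [trailRunsB]

theorem trailF_nil_buf (l : List Char) (bt : Int) : trailF [] bt l = trailRunsB l := by
  cases l with
  | nil => simp [trailF, trailRunsB]
  | cons c l =>
    simp only [trailF]
    rw [trailF_run l [c] (exprtypeC c) (by simp)]
    simp [trailRunsB]

-- ===== VERDICT (by name: the statement is the Claim_ definition above) =====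
theorem trail_py_spec : Claim_equal_trail_py := by
  intro expr sym _
  unfold Spec_trail_py trail_py trail_py_alt
  rw [foldA_char expr.toList [] [] 1, List.nil_append, trailF_nil_buf]
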